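-- pv_equiv track=rewrite | github.com/kylemhuggins/Sudoku-Solver | Sudoku Solver v2.py | countCheck
-- ===== SOURCE A (Python) =====
-- def countCheck(listToCheck):
--
--     # the list to check should have len 9
--     # if list is cleared as ok, return true (masterCheck = 0 still)
--     # if list is NOT cleared as ok, return false and list of numbers for which there are errors
--
--     masterCheck = 0
--     errorList = []
--
--     for i in range(9):
--         check = listToCheck.count(i+1)
--         if check > 1:
--             masterCheck += 1
--             errorDigit = i + 1
--             errorList.append(errorDigit)
--
--     if masterCheck == 0:
--         return True, []
--     else:
--         return False, errorList
-- ===== SOURCE B (Python) =====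
-- def countCheck(listToCheck):
--     seen = set()
--     duplicates = set()
--     for v in listToCheck:
--         if 1 <= v <= 9 and v in seen:
--             duplicates.add(v)
--         seen.add(v)
--     if duplicates:
--         return False, sorted(duplicates)
--     return True, []
-- ===== Notes on version B (the rewrite author's own statement) =====
-- stated objective: alternative
-- what changed: Replaces the nine-digit loop that rescans the list with list.count per digit by a single pass maintaining a seen set and a duplicates set, sorting the duplicates at the end.
import Mathlib
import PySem

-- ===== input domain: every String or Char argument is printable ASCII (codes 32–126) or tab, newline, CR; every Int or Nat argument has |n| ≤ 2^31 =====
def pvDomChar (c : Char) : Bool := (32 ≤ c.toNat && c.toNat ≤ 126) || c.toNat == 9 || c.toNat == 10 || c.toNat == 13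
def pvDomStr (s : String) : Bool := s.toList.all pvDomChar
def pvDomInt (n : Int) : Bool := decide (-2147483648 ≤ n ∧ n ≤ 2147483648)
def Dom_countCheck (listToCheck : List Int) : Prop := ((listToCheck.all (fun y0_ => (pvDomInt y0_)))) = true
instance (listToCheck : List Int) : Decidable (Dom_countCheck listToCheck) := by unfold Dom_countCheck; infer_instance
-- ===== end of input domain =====

-- B replaces A's nine passes (one list.count per digit) by a single pass with a seen/duplicates set pair; same value everywhere.

-- ===== PORT A =====
def countCheck (listToCheck : List Int) : Bool × List Int :=
  -- masterCheck, errorList accumulated over for i in range(9)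
  let st := (PySem.List.pyRange 0 9 1).foldl
      (fun (s : Int × List Int) i =>
        let check := PySem.List.count listToCheck (i + 1)
        if 1 < check then (s.1 + 1, s.2 ++ [i + 1]) else s)
      ((0 : Int), ([] : List Int))
  if st.1 = 0 then (true, []) else (false, st.2)

-- ===== PORT B =====
def countCheck_alt (listToCheck : List Int) : Bool × List Int :=
  -- state = (seen, duplicates); duplicates is tested before seen.add, as in Source B
  let st := listToCheck.foldl
      (fun (s : PySem.Set Int × PySem.Set Int) v =>
        (PySem.Set.add s.1 v,
         if 1 ≤ v ∧ v ≤ 9 ∧ s.1.contains v = true then PySem.Set.add s.2 v else s.2))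
      ((PySem.Set.empty : PySem.Set Int), (PySem.Set.empty : PySem.Set Int))
  if st.2 ≠ [] then (false, PySem.List.sorted st.2 (fun x => x)) else (true, [])

-- ===== PRECONDITION & SPEC =====
def Spec_countCheck (listToCheck : List Int) (out : Bool × List Int) : Prop := out = countCheck_alt listToCheck
instance (listToCheck : List Int) (out : Bool × List Int) : Decidable (Spec_countCheck listToCheck out) := by unfold Spec_countCheck; infer_instance

-- ===== CLAIM (what is proved, stated in full; the proofs are below) =====
def Claim_equal_countCheck : Prop := ∀ (listToCheck : List Int), Dom_countCheck listToCheck → Spec_countCheck listToCheck (countCheck listToCheck)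

-- ===== LEMMAS AND PROOFS =====

-- A's loop body and the sorted error list it produces
def aStep (l : List Int) : Int × List Int → Int → Int × List Int :=
  fun s i =>
    let check := PySem.List.count l (i + 1)
    if 1 < check then (s.1 + 1, s.2 ++ [i + 1]) else s

def errF (l : List Int) : List Int :=
  ((PySem.List.pyRange 0 9 1).filter fun i => 1 < PySem.List.count l (i + 1)).map (· + 1)

def bStep : PySem.Set Int × PySem.Set Int → Int → PySem.Set Int × PySem.Set Int :=
  fun s v =>
    (PySem.Set.add s.1 v,
     if 1 ≤ v ∧ v ≤ 9 ∧ s.1.contains v = true then PySem.Set.add s.2 v else s.2)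

lemma aLoop (l ds : List Int) (m : Int) (e : List Int) :
    ds.foldl (aStep l) (m, e)
      = (m + ((ds.filter fun i => 1 < PySem.List.count l (i + 1)).length : Int),
         e ++ (ds.filter fun i => 1 < PySem.List.count l (i + 1)).map (· + 1)) := by
  induction ds generalizing m e with
  | nil => simp
  | cons d ds ih =>
    simp only [List.foldl_cons]
    by_cases h : 1 < PySem.List.count l (d + 1)
    · have h' : 1 < List.count (d + 1) l := by rw [← PySem.List.count_eq]; exact h
      rw [show aStep l (m, e) d = (m + 1, e ++ [d + 1]) from by simp [aStep, h'], ih,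
        List.filter_cons_of_pos (by simpa using h)]
      refine Prod.ext ?_ ?_
      · simp; ring
      · simp
    · have h' : ¬1 < List.count (d + 1) l := by rw [← PySem.List.count_eq]; exact h
      rw [show aStep l (m, e) d = (m, e) from by simp [aStep, h'], ih,
        List.filter_cons_of_neg (by simpa using h)]

lemma countCheck_eq (l : List Int) :
    countCheck l = if errF l = [] then (true, []) else (false, errF l) := by
  show (let st := (PySem.List.pyRange 0 9 1).foldl (aStep l) ((0:Int), ([] : List Int));
        if st.1 = 0 then (true, ([] : List Int)) else (false, st.2)) = _
  rw [aLoop]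
  rcases eq_or_ne (errF l) [] with h | h
  · have hf : ((PySem.List.pyRange 0 9 1).filter fun i => 1 < PySem.List.count l (i + 1)) = [] := by
      simpa [errF] using h
    rw [hf, h]
    simp
  · have hf : ((PySem.List.pyRange 0 9 1).filter fun i => 1 < PySem.List.count l (i + 1)) ≠ [] := by
      intro hc
      apply h
      unfold errF
      rw [hc]
      rfl
    have hne : ¬((0 : Int) + (((PySem.List.pyRange 0 9 1).filter fun i => 1 < PySem.List.count l (i + 1)).length : Int) = 0) := by
      have := List.length_pos_of_ne_nil hf
      omega
    show (if _ = 0 then _ else _) = _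
    rw [if_neg hne, if_neg h]
    simp [errF]

lemma mem_errF (l : List Int) (x : Int) :
    x ∈ errF l ↔ 1 ≤ x ∧ x ≤ 9 ∧ 2 ≤ List.count x l := by
  have hr : PySem.List.pyRange 0 9 1 = [0, 1, 2, 3, 4, 5, 6, 7, 8] := by decide
  simp only [errF, hr, List.mem_map, List.mem_filter, PySem.List.count_eq]
  constructor
  · rintro ⟨i, ⟨hmem, hcount⟩, hx⟩
    have hb : 0 ≤ i ∧ i ≤ 8 := by
      simp only [List.mem_cons, List.not_mem_nil, or_false] at hmem
      rcases hmem with h|h|h|h|h|h|h|h|h <;> omega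
    simp only [decide_eq_true_eq] at hcount
    subst hx
    exact ⟨by omega, by omega, by omega⟩
  · rintro ⟨h1, h2, hc⟩
    refine ⟨x - 1, ⟨?_, ?_⟩, by ring⟩
    · have : x - 1 = 0 ∨ x - 1 = 1 ∨ x - 1 = 2 ∨ x - 1 = 3 ∨ x - 1 = 4 ∨ x - 1 = 5 ∨
          x - 1 = 6 ∨ x - 1 = 7 ∨ x - 1 = 8 := by omega
      simpa using this
    · have hxx : x - 1 + 1 = x := by ring
      rw [hxx]
      simpa using hc

lemma pairwise_errF (l : List Int) : (errF l).Pairwise (· < ·) := by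
  have hr : (PySem.List.pyRange 0 9 1).Pairwise (· < ·) := by decide
  exact List.pairwise_map.mpr ((hr.filter _).imp (by intro a b h; omega))

lemma nodup_errF (l : List Int) : (errF l).Nodup :=
  (pairwise_errF l).imp (fun h => ne_of_lt h)

lemma bLoop_mem (l : List Int) : ∀ (seen dups : PySem.Set Int) (x : Int),
    x ∈ (l.foldl bStep (seen, dups)).2 ↔
      x ∈ dups ∨ (1 ≤ x ∧ x ≤ 9 ∧ ((x ∈ seen ∧ x ∈ l) ∨ 2 ≤ List.count x l)) := by
  induction l with
  | nil => intro seen dups x; simp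
  | cons v rest ih =>
    intro seen dups x
    simp only [List.foldl_cons]
    have hstep : bStep (seen, dups) v
        = (PySem.Set.add seen v,
           if 1 ≤ v ∧ v ≤ 9 ∧ seen.contains v = true then PySem.Set.add dups v else dups) := rfl
    rw [hstep, ih]
    have hrc : x ∈ rest ↔ 0 < List.count x rest := List.count_pos_iff.symm
    by_cases hx : x = v
    · subst hx
      rw [List.count_cons_self]
      by_cases hc : 1 ≤ x ∧ x ≤ 9 ∧ seen.contains x = true
      · have hS : x ∈ seen := (PySem.Set.contains_iff seen x).mp hc.2.2
        rw [if_pos hc]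
        constructor
        · intro _
          exact Or.inr ⟨hc.1, hc.2.1, Or.inl ⟨hS, List.mem_cons_self⟩⟩
        · intro _
          exact Or.inl ((PySem.Set.mem_add dups x x).mpr (Or.inr rfl))
      · rw [if_neg hc]
        constructor
        · rintro (hA | ⟨h1, h2, h3⟩)
          · exact Or.inl hA
          · refine Or.inr ⟨h1, h2, Or.inr ?_⟩
            rcases h3 with ⟨_, hr⟩ | hcnt
            · rw [hrc] at hr; omega
            · omega
        · rintro (hA | ⟨h1, h2, h3⟩)
          · exact Or.inl hA
          · refine Or.inr ⟨h1, h2, ?_⟩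
            rcases h3 with ⟨hS, _⟩ | hcnt
            · exact absurd ⟨h1, h2, (PySem.Set.contains_iff seen x).mpr hS⟩ hc
            · refine Or.inl ⟨(PySem.Set.mem_add seen x x).mpr (Or.inr rfl), ?_⟩
              rw [hrc]; omega
    · have hcc : List.count x (v :: rest) = List.count x rest := by
        rw [List.count_cons]; simp [Ne.symm hx]
      rw [hcc]
      by_cases hc : 1 ≤ v ∧ v ≤ 9 ∧ seen.contains v = true
      · rw [if_pos hc]
        simp [PySem.Set.mem_add, hx, List.mem_cons]
      · rw [if_neg hc]
        simp [PySem.Set.mem_add, hx, List.mem_cons]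

lemma bLoop_nodup (l : List Int) : ∀ (seen dups : PySem.Set Int), dups.Nodup →
    (l.foldl bStep (seen, dups)).2.Nodup := by
  induction l with
  | nil => intro _ _ h; simpa
  | cons v rest ih =>
    intro seen dups h
    simp only [List.foldl_cons]
    apply ih
    show (if 1 ≤ v ∧ v ≤ 9 ∧ seen.contains v = true then PySem.Set.add dups v else dups).Nodup
    split_ifs
    · exact PySem.Set.nodup_add dups v h
    · exact h

lemma errF_perm_bDups (l : List Int) :
    (errF l).Perm (l.foldl bStep (([] : PySem.Set Int), ([] : PySem.Set Int))).2 := by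
  rw [List.perm_ext_iff_of_nodup (nodup_errF l)
      (bLoop_nodup l [] [] (by simp))]
  intro a
  rw [mem_errF, bLoop_mem]
  simp

-- ===== VERDICT (by name: the statement is the Claim_ definition above) =====
theorem countCheck_spec : Claim_equal_countCheck := by
  intro l _
  unfold Spec_countCheck
  rw [countCheck_eq]
  show _ = (if (l.foldl bStep (([] : PySem.Set Int), ([] : PySem.Set Int))).2 ≠ [] then
              (false, PySem.List.sorted (l.foldl bStep (([] : PySem.Set Int), ([] : PySem.Set Int))).2 (fun x => x))
            else (true, ([] : List Int)))
  have hperm := errF_perm_bDups l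
  rcases eq_or_ne (errF l) [] with h | h
  · have hD : (l.foldl bStep (([] : PySem.Set Int), ([] : PySem.Set Int))).2 = [] := by
      have := hperm.length_eq
      rw [h] at this
      exact List.length_eq_zero_iff.mp this.symm
    rw [if_pos h, if_neg (by simpa using hD)]
  · have hD : (l.foldl bStep (([] : PySem.Set Int), ([] : PySem.Set Int))).2 ≠ [] := by
      intro hc
      have := hperm.length_eq
      rw [hc] at this
      exact h (List.length_eq_zero_iff.mp this)
    have hsorted := PySem.List.sorted_eq_of_perm_of_pairwise_lt
      (l.foldl bStep (([] : PySem.Set Int), ([] : PySem.Set Int))).2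
      (errF l) (fun x => x) hperm (pairwise_errF l)
    rw [if_neg h, if_pos (by simpa using hD), hsorted]
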